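-- pv_equiv track=rewrite | github.com/learnwithparam/monkey-kata | api/demos/document_qa_chatbot/document_utils.py | _parse_risk_response
-- ===== SOURCE A (Python) =====
-- from typing import List, Dict, Any, Tuple, Optional, AsyncGenerator
--
-- def _parse_risk_response(response: str) -> List[Dict[str, Any]]:
--     """Parse LLM response into structured risk data"""
--     risks = []
--     lines = response.split('\n')
--
--     current_risk = {}
--     for line in lines:
--         line = line.strip()
--         if line.startswith('RISK_LEVEL:'):
--             if current_risk:
--                 risks.append(current_risk)
--             current_risk = {'risk_level': line.split(':', 1)[1].strip().lower()}
--         elif line.startswith('CATEGORY:'):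
--             current_risk['category'] = line.split(':', 1)[1].strip()
--         elif line.startswith('DESCRIPTION:'):
--             current_risk['description'] = line.split(':', 1)[1].strip()
--         elif line.startswith('CLAUSE:'):
--             current_risk['clause'] = line.split(':', 1)[1].strip()
--         elif line.startswith('RECOMMENDATION:'):
--             current_risk['recommendation'] = line.split(':', 1)[1].strip()
--
--     if current_risk:
--         risks.append(current_risk)
--
--     return risks
-- ===== SOURCE B (Python) =====
-- def _parse_risk_response(response):
--     """Two-pass rewrite: partition stripped lines into segments at RISK_LEVEL markers, then parse each segment into a dict."""
--     segments = []
--     current = []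
--     for raw in response.split('\n'):
--         line = raw.strip()
--         if line.startswith('RISK_LEVEL:'):
--             segments.append(current)
--             current = [line]
--         else:
--             current.append(line)
--     segments.append(current)
--
--     risks = []
--     for seg in segments:
--         risk = {}
--         for line in seg:
--             if line.startswith('RISK_LEVEL:'):
--                 risk['risk_level'] = line.split(':', 1)[1].strip().lower()
--             elif line.startswith('CATEGORY:'):
--                 risk['category'] = line.split(':', 1)[1].strip()
--             elif line.startswith('DESCRIPTION:'):
--                 risk['description'] = line.split(':', 1)[1].strip()
--             elif line.startswith('CLAUSE:'):
--                 risk['clause'] = line.split(':', 1)[1].strip()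
--             elif line.startswith('RECOMMENDATION:'):
--                 risk['recommendation'] = line.split(':', 1)[1].strip()
--         if risk:
--             risks.append(risk)
--     return risks
-- ===== Notes on version B (the rewrite author's own statement) =====
-- stated objective: alternative
-- what changed: Replaces A's single pass with a running (risks, current_risk) dict accumulator by a two-pass decomposition: first partition the stripped lines into segments cut before each RISK_LEVEL marker, then parse each segment independently into a dict and keep the non-empty ones.
import Mathlib
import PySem

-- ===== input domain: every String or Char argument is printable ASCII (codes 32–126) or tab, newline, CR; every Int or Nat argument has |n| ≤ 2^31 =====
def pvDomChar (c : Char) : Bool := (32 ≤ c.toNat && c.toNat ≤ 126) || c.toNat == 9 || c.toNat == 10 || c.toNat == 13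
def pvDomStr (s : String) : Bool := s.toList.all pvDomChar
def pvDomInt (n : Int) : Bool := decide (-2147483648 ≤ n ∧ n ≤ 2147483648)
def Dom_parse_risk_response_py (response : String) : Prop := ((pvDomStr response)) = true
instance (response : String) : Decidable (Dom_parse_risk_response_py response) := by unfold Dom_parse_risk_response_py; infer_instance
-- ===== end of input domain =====

-- B re-implements the parser as two passes (partition the stripped lines into segments at RISK_LEVEL markers, then parse each segment to a dict); same result, different decomposition (objective: alternative).

-- shared expression helper: line.split(':', 1)[1].strip()  (this exact expression occurs in both Pythons)
def pvVal (line : String) : String :=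
  PySem.Str.strip (((PySem.Str.splitMax? line ":" 1).getD []).getD 1 "")

-- ===== PORT A =====
-- loop body of A's single pass over lines, state = (risks, current_risk)
def pvStepA (st : List (PySem.Dict String String) × PySem.Dict String String) (raw : String) :
    List (PySem.Dict String String) × PySem.Dict String String :=
  let line := PySem.Str.strip raw
  if PySem.Str.startswith line "RISK_LEVEL:" then
    ((if st.2.items = [] then st.1 else st.1 ++ [st.2]),
     PySem.Dict.ofList [("risk_level", PySem.Str.lower (pvVal line))])
  else if PySem.Str.startswith line "CATEGORY:" then (st.1, st.2.insert "category" (pvVal line))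
  else if PySem.Str.startswith line "DESCRIPTION:" then (st.1, st.2.insert "description" (pvVal line))
  else if PySem.Str.startswith line "CLAUSE:" then (st.1, st.2.insert "clause" (pvVal line))
  else if PySem.Str.startswith line "RECOMMENDATION:" then (st.1, st.2.insert "recommendation" (pvVal line))
  else st

-- A's trailing 'if current_risk: risks.append(current_risk)'
def pvAfin (st : List (PySem.Dict String String) × PySem.Dict String String) :
    List (PySem.Dict String String) :=
  if st.2.items = [] then st.1 else st.1 ++ [st.2]

def parse_risk_response_py (response : String) : List (List (String × String)) :=
  (pvAfin (((PySem.Str.split? response "\n").getD []).foldl pvStepA ([], PySem.Dict.empty))).map (·.items)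

-- ===== PORT B =====
-- B first pass: partition stripped lines into segments, cutting before each RISK_LEVEL line
def pvSegStep (st : List (List String) × List String) (raw : String) :
    List (List String) × List String :=
  let line := PySem.Str.strip raw
  if PySem.Str.startswith line "RISK_LEVEL:" then (st.1 ++ [st.2], [line])
  else (st.1, st.2 ++ [line])

-- B second pass, inner loop body: fill one risk dict from one (already stripped) line
def pvParseLine (d : PySem.Dict String String) (line : String) : PySem.Dict String String :=
  if PySem.Str.startswith line "RISK_LEVEL:" then d.insert "risk_level" (PySem.Str.lower (pvVal line))
  else if PySem.Str.startswith line "CATEGORY:" then d.insert "category" (pvVal line)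
  else if PySem.Str.startswith line "DESCRIPTION:" then d.insert "description" (pvVal line)
  else if PySem.Str.startswith line "CLAUSE:" then d.insert "clause" (pvVal line)
  else if PySem.Str.startswith line "RECOMMENDATION:" then d.insert "recommendation" (pvVal line)
  else d

def pvParseSeg (seg : List String) : PySem.Dict String String :=
  seg.foldl pvParseLine PySem.Dict.empty

-- B second pass, outer loop body: keep the non-empty dicts
def pvOutStep (out : List (PySem.Dict String String)) (seg : List String) :
    List (PySem.Dict String String) :=
  let d := pvParseSeg seg
  if d.items = [] then out else out ++ [d]

-- B's finish: process segments (done ones ++ the current one) and project to item lists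
def pvBOut (st : List (List String) × List String) : List (List (String × String)) :=
  ((st.1 ++ [st.2]).foldl pvOutStep []).map (·.items)

def parse_risk_response_py_alt (response : String) : List (List (String × String)) :=
  pvBOut (((PySem.Str.split? response "\n").getD []).foldl pvSegStep ([], []))

-- ===== PRECONDITION & SPEC =====
def Spec_parse_risk_response_py (response : String) (out : List (List (String × String))) : Prop := out = parse_risk_response_py_alt response
instance (response : String) (out : List (List (String × String))) : Decidable (Spec_parse_risk_response_py response out) := by unfold Spec_parse_risk_response_py; infer_instance

-- ===== CLAIM (what is proved, stated in full; the proofs are below) =====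
def Claim_equal_parse_risk_response_py : Prop := ∀ (response : String), Dom_parse_risk_response_py response → Spec_parse_risk_response_py response (parse_risk_response_py response)

-- ===== LEMMAS AND PROOFS =====

-- 0 or 1 dicts emitted for a finished group
def pvEmit (c : PySem.Dict String String) : List (PySem.Dict String String) :=
  if c.items = [] then [] else [c]

-- common recursive characterisation of both programs' remaining work
def pvGo (cur : PySem.Dict String String) : List String → List (PySem.Dict String String)
  | [] => pvEmit cur
  | raw :: rest =>
    let line := PySem.Str.strip raw
    if PySem.Str.startswith line "RISK_LEVEL:" then
      pvEmit cur ++ pvGo (PySem.Dict.ofList [("risk_level", PySem.Str.lower (pvVal line))]) rest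
    else pvGo (pvParseLine cur line) rest

theorem pvStepA_marker (st : List (PySem.Dict String String) × PySem.Dict String String)
    (raw : String) (h : PySem.Str.startswith (PySem.Str.strip raw) "RISK_LEVEL:" = true) :
    pvStepA st raw = ((if st.2.items = [] then st.1 else st.1 ++ [st.2]),
      PySem.Dict.ofList [("risk_level", PySem.Str.lower (pvVal (PySem.Str.strip raw)))]) := by
  simp only [pvStepA]
  rw [if_pos h]

theorem pvStepA_not_marker (st : List (PySem.Dict String String) × PySem.Dict String String)
    (raw : String) (h : PySem.Str.startswith (PySem.Str.strip raw) "RISK_LEVEL:" = false) :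
    pvStepA st raw = (st.1, pvParseLine st.2 (PySem.Str.strip raw)) := by
  have hne := ne_true_of_eq_false h
  simp only [pvStepA, pvParseLine]
  rw [if_neg hne, if_neg hne]
  split_ifs <;> rfl

theorem pvGo_marker (cur : PySem.Dict String String) (raw : String) (rest : List String)
    (h : PySem.Str.startswith (PySem.Str.strip raw) "RISK_LEVEL:" = true) :
    pvGo cur (raw :: rest)
      = pvEmit cur ++ pvGo (PySem.Dict.ofList
          [("risk_level", PySem.Str.lower (pvVal (PySem.Str.strip raw)))]) rest := by
  simp only [pvGo]
  rw [if_pos h]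

theorem pvGo_not_marker (cur : PySem.Dict String String) (raw : String) (rest : List String)
    (h : PySem.Str.startswith (PySem.Str.strip raw) "RISK_LEVEL:" = false) :
    pvGo cur (raw :: rest) = pvGo (pvParseLine cur (PySem.Str.strip raw)) rest := by
  simp only [pvGo]
  rw [if_neg (ne_true_of_eq_false h)]

theorem pvA_loop (ls : List String) :
    ∀ (risks : List (PySem.Dict String String)) (cur : PySem.Dict String String),
    pvAfin (ls.foldl pvStepA (risks, cur)) = risks ++ pvGo cur ls := by
  induction ls with
  | nil =>
    intro risks cur
    simp only [List.foldl_nil, pvGo, pvAfin, pvEmit]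
    split_ifs <;> simp
  | cons raw rest ih =>
    intro risks cur
    cases h : PySem.Str.startswith (PySem.Str.strip raw) "RISK_LEVEL:" with
    | true =>
      rw [List.foldl_cons, pvStepA_marker _ _ h, ih, pvGo_marker _ _ _ h, pvEmit]
      split_ifs <;> simp
    | false =>
      rw [List.foldl_cons, pvStepA_not_marker _ _ h, ih, pvGo_not_marker _ _ _ h]

theorem pvParseSeg_append (cs : List String) (l : String) :
    pvParseSeg (cs ++ [l]) = pvParseLine (pvParseSeg cs) l := by
  simp [pvParseSeg]

theorem pvParseSeg_marker (l : String)
    (h : PySem.Str.startswith l "RISK_LEVEL:" = true) :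
    pvParseSeg [l] = PySem.Dict.ofList [("risk_level", PySem.Str.lower (pvVal l))] := by
  simp only [pvParseSeg, List.foldl_cons, List.foldl_nil, pvParseLine]
  rw [if_pos h]
  rfl

theorem pvOut_fold (segs : List (List String)) :
    ∀ (acc : List (PySem.Dict String String)),
    segs.foldl pvOutStep acc = acc ++ segs.flatMap (fun s => pvEmit (pvParseSeg s)) := by
  induction segs with
  | nil => intro acc; simp
  | cons s rest ih =>
    intro acc
    rw [List.foldl_cons]
    simp only [pvOutStep]
    rw [ih]
    simp only [List.flatMap_cons, pvEmit]
    split_ifs <;> simp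

theorem pvSegStep_marker (st : List (List String) × List String) (raw : String)
    (h : PySem.Str.startswith (PySem.Str.strip raw) "RISK_LEVEL:" = true) :
    pvSegStep st raw = (st.1 ++ [st.2], [PySem.Str.strip raw]) := by
  simp only [pvSegStep]
  rw [if_pos h]

theorem pvSegStep_not_marker (st : List (List String) × List String) (raw : String)
    (h : PySem.Str.startswith (PySem.Str.strip raw) "RISK_LEVEL:" = false) :
    pvSegStep st raw = (st.1, st.2 ++ [PySem.Str.strip raw]) := by
  simp only [pvSegStep]
  rw [if_neg (ne_true_of_eq_false h)]

theorem pvB_loop (ls : List String) :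
    ∀ (segs : List (List String)) (cs : List String),
    (((ls.foldl pvSegStep (segs, cs)).1 ++ [(ls.foldl pvSegStep (segs, cs)).2]).flatMap
        (fun s => pvEmit (pvParseSeg s)))
      = segs.flatMap (fun s => pvEmit (pvParseSeg s)) ++ pvGo (pvParseSeg cs) ls := by
  induction ls with
  | nil => intro segs cs; simp [pvGo]
  | cons raw rest ih =>
    intro segs cs
    cases h : PySem.Str.startswith (PySem.Str.strip raw) "RISK_LEVEL:" with
    | true =>
      rw [List.foldl_cons, pvSegStep_marker _ _ h, ih, pvParseSeg_marker _ h,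
        pvGo_marker _ _ _ h]
      simp
    | false =>
      rw [List.foldl_cons, pvSegStep_not_marker _ _ h, ih, pvParseSeg_append,
        pvGo_not_marker _ _ _ h]

-- ===== VERDICT (by name: the statement is the Claim_ definition above) =====
theorem parse_risk_response_py_spec : Claim_equal_parse_risk_response_py := by
  intro response _
  unfold Spec_parse_risk_response_py parse_risk_response_py parse_risk_response_py_alt pvBOut
  rw [pvA_loop, pvOut_fold, pvB_loop]
  simp [pvParseSeg]
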